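-- pv_equiv track=rewrite | github.com/Jordan231111/CodeForce-Solutions | Codeforces Round 1029 (Div. 3)/quick_check.py | solve_pref
-- ===== SOURCE A (Python) =====
-- def solve_pref(a,b):
--     n=len(a)
--     ans_no=0
--     for i in range(n):
--         if a[i]==b[i]:
--             ans_no=max(ans_no,i+1)  # results 1-indexed length
--     for i in range(n-1):
--         if a[i]==a[i+1] or b[i]==b[i+1]:
--             ans_no=max(ans_no, i+1)
--     seenA=set(); seenB=set(); ans_rem=0
--     for j in range(n-2,-1,-1):
--         if a[j] in seenA or a[j] in seenB or b[j] in seenA or b[j] in seenB: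
--             ans_rem=max(ans_rem, j+1)
--         seenA.add(a[j+1]); seenB.add(b[j+1])
--     return max(ans_no, ans_rem)
-- ===== SOURCE B (Python) =====
-- def solve_pref(a, b):
--     n = len(a)
--     last = {}
--     for i in range(n):
--         last[a[i]] = i
--         last[b[i]] = i
--     ans = 0
--     for j in range(n):
--         if a[j] == b[j]:
--             ans = j + 1
--         elif j + 1 < n and (a[j] == a[j+1] or b[j] == b[j+1]):
--             ans = j + 1
--         elif last[a[j]] > j + 1 or last[b[j]] > j + 1:
--             ans = j + 1
--     return ans
-- ===== Notes on version B (the rewrite author's own statement) =====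
-- stated objective: alternative
-- what changed: The three passes (equal-position scan, adjacent-equality scan, and a backward pass growing two seen-sets) are replaced by one precomputed last-occurrence dictionary over both arrays plus a single forward overwrite scan that tests all three prefix conditions at once.
import Mathlib
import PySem

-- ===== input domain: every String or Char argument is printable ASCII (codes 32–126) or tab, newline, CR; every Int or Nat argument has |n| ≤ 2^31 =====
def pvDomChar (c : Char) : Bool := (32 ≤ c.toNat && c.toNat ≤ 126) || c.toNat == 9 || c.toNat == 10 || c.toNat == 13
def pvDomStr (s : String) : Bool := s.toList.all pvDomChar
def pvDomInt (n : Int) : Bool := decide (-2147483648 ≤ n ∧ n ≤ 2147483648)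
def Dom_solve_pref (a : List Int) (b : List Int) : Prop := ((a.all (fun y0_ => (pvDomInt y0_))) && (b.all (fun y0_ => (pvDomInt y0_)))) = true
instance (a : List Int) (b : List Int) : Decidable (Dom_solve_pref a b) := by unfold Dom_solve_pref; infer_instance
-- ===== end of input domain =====

-- B replaces A's three passes (incl. the backward seen-set pass) by a last-occurrence
-- dictionary over both arrays plus one forward scan; objective: alternative structure, same cost.


-- ===== PORT A =====
def solve_pref (a : List Int) (b : List Int) : Int :=
  let n : Int := (a.length : Int)
  let ans1 : Int := (PySem.List.pyRange 0 n 1).foldl (fun ans i =>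
    if PySem.List.pyGetD a i 0 == PySem.List.pyGetD b i 0 then max ans (i + 1) else ans) 0
  let ans2 : Int := (PySem.List.pyRange 0 (n - 1) 1).foldl (fun ans i =>
    if PySem.List.pyGetD a i 0 == PySem.List.pyGetD a (i + 1) 0
       || PySem.List.pyGetD b i 0 == PySem.List.pyGetD b (i + 1) 0
    then max ans (i + 1) else ans) ans1
  let st := (PySem.List.pyRange (n - 2) (-1) (-1)).foldl
    (fun (st : PySem.Set Int × PySem.Set Int × Int) j =>
      (PySem.Set.add st.1 (PySem.List.pyGetD a (j + 1) 0),
       PySem.Set.add st.2.1 (PySem.List.pyGetD b (j + 1) 0),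
       if PySem.Set.contains st.1 (PySem.List.pyGetD a j 0)
          || PySem.Set.contains st.2.1 (PySem.List.pyGetD a j 0)
          || PySem.Set.contains st.1 (PySem.List.pyGetD b j 0)
          || PySem.Set.contains st.2.1 (PySem.List.pyGetD b j 0)
       then max st.2.2 (j + 1) else st.2.2))
    (PySem.Set.empty, PySem.Set.empty, 0)
  max ans2 st.2.2

-- ===== PORT B =====
-- (last[x] in Source B is looked up only at keys the build loop inserted, so getD is exact there)
def solve_pref_alt (a : List Int) (b : List Int) : Int :=
  let n : Int := (a.length : Int)
  let last : PySem.Dict Int Int := (PySem.List.pyRange 0 n 1).foldl (fun d i =>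
    (d.insert (PySem.List.pyGetD a i 0) i).insert (PySem.List.pyGetD b i 0) i) PySem.Dict.empty
  (PySem.List.pyRange 0 n 1).foldl (fun ans j =>
    if PySem.List.pyGetD a j 0 == PySem.List.pyGetD b j 0 then j + 1
    else if decide (j + 1 < n)
            && (PySem.List.pyGetD a j 0 == PySem.List.pyGetD a (j + 1) 0
                || PySem.List.pyGetD b j 0 == PySem.List.pyGetD b (j + 1) 0) then j + 1
    else if decide (j + 1 < last.getD (PySem.List.pyGetD a j 0) 0)
            || decide (j + 1 < last.getD (PySem.List.pyGetD b j 0) 0) then j + 1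
    else ans) 0

-- ===== PRECONDITION & SPEC =====
-- Pre_ excludes only the inputs where the Python A raises IndexError: b shorter than a.
def Pre_solve_pref (a : List Int) (b : List Int) : Prop := a.length ≤ b.length
instance (a : List Int) (b : List Int) : Decidable (Pre_solve_pref a b) := by
  unfold Pre_solve_pref; infer_instance
def pvWitness_solve_pref : List Int × List Int := ([1, 2, 1], [3, 1, 4])

def Spec_solve_pref (a : List Int) (b : List Int) (out : Int) : Prop := out = solve_pref_alt a b
instance (a : List Int) (b : List Int) (out : Int) : Decidable (Spec_solve_pref a b out) := by
  unfold Spec_solve_pref; infer_instance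

-- ===== CLAIM (what is proved, stated in full; the proofs are below) =====
def Claim_equal_solve_pref : Prop := ∀ (a : List Int) (b : List Int), Dom_solve_pref a b →
  Pre_solve_pref a b → Spec_solve_pref a b (solve_pref a b)

-- ===== LEMMAS AND PROOFS =====

-- prefix conditions as predicates on a Nat index
def pA1 (a b : List Int) (j : Nat) : Bool := a.getD j 0 == b.getD j 0
def pA2 (a b : List Int) (j : Nat) : Bool :=
  a.getD j 0 == a.getD (j + 1) 0 || b.getD j 0 == b.getD (j + 1) 0
def pA3 (a b : List Int) (n j : Nat) : Bool :=
  (List.range n).any (fun k => decide (j + 2 ≤ k) &&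
    (a.getD j 0 == a.getD k 0 || a.getD j 0 == b.getD k 0
     || b.getD j 0 == a.getD k 0 || b.getD j 0 == b.getD k 0))

-- running max of (j+1) over indices satisfying p (A's accumulation shape)
def maxF (p : Nat → Bool) : Nat → Int
  | 0 => 0
  | m + 1 => if p m then max (maxF p m) ((m : Int) + 1) else maxF p m

-- forward overwrite (B's accumulation shape)
def bestF (p : Nat → Bool) : Nat → Int
  | 0 => 0
  | m + 1 => if p m then (m : Int) + 1 else bestF p m

-- last-occurrence value the dictionary of B stores (0 if the key is absent)
def specLast (a b : List Int) : Nat → Int → Int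
  | 0, _ => 0
  | m + 1, x => if a.getD m 0 == x || b.getD m 0 == x then (m : Int) else specLast a b m x

theorem maxF_bounds (p : Nat → Bool) (m : Nat) : 0 ≤ maxF p m ∧ maxF p m ≤ (m : Int) := by
  induction m with
  | zero => simp [maxF]
  | succ m ih =>
    simp only [maxF]
    split_ifs <;> push_cast <;> omega
--ENDPF


theorem bestF_bounds (p : Nat → Bool) (m : Nat) : 0 ≤ bestF p m ∧ bestF p m ≤ (m : Int) := by
  induction m with
  | zero => simp [bestF]
  | succ m ih =>
    simp only [bestF]
    split_ifs <;> push_cast <;> omega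
--ENDPF


theorem maxF_eq_bestF (p : Nat → Bool) (m : Nat) : maxF p m = bestF p m := by
  induction m with
  | zero => rfl
  | succ m ih =>
    have hb := maxF_bounds p m
    simp only [maxF, bestF, ih]
    split_ifs with h
    · rw [ih] at hb; omega
    · rfl
--ENDPF


theorem bestF_congr (p q : Nat → Bool) (m : Nat) (h : ∀ j < m, p j = q j) :
    bestF p m = bestF q m := by
  induction m with
  | zero => rfl
  | succ m ih =>
    simp only [bestF, h m (Nat.lt_succ_self m)]
    rw [ih (fun j hj => h j (Nat.lt_succ_of_lt hj))]
--ENDPF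


theorem bestF_or (p q : Nat → Bool) (m : Nat) :
    bestF (fun j => p j || q j) m = max (bestF p m) (bestF q m) := by
  induction m with
  | zero => simp [bestF]
  | succ m ih =>
    have hp := bestF_bounds p m
    have hq := bestF_bounds q m
    simp only [bestF, ih]
    cases hpm : p m <;> cases hqm : q m <;> simp <;> omega
--ENDPF


theorem foldl_ite_max (p : Nat → Bool) (m : Nat) (v : Int) (hv : 0 ≤ v) :
    (List.range m).foldl (fun ans k => if p k then max ans ((k : Int) + 1) else ans) v
      = max v (maxF p m) := by
  induction m with
  | zero => simp [maxF]; omega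
  | succ m ih =>
    have hb := maxF_bounds p m
    rw [List.range_succ, List.foldl_append, ih]
    simp only [List.foldl_cons, List.foldl_nil, maxF]
    split_ifs with h
    · omega
    · rfl
--ENDPF


theorem foldl_ite_best (p : Nat → Bool) (m : Nat) :
    (List.range m).foldl (fun ans k => if p k then (k : Int) + 1 else ans) 0 = bestF p m := by
  induction m with
  | zero => rfl
  | succ m ih =>
    rw [List.range_succ, List.foldl_append, ih]
    simp only [List.foldl_cons, List.foldl_nil, bestF]
--ENDPF



def backStep (a b : List Int) (st : PySem.Set Int × PySem.Set Int × Int) (m : Nat) :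
    PySem.Set Int × PySem.Set Int × Int :=
  (PySem.Set.add st.1 (a.getD (m + 1) 0),
   PySem.Set.add st.2.1 (b.getD (m + 1) 0),
   if PySem.Set.contains st.1 (a.getD m 0) || PySem.Set.contains st.2.1 (a.getD m 0)
      || PySem.Set.contains st.1 (b.getD m 0) || PySem.Set.contains st.2.1 (b.getD m 0)
   then max st.2.2 ((m : Int) + 1) else st.2.2)

def back (a b : List Int) : Nat → (PySem.Set Int × PySem.Set Int × Int) → (PySem.Set Int × PySem.Set Int × Int)
  | 0, st => st
  | m + 1, st => back a b m (backStep a b st m)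

theorem pyRange_negstep (m : Nat) :
    PySem.List.pyRange (m : Int) (-1) (-1) = (List.range (m + 1)).map (fun k => ((m - k : Nat) : Int)) := by
  simp only [PySem.List.pyRange]
  norm_num
  have h1 : (-1 : Int) < (m : Int) := by omega
  rw [if_pos h1]
  apply List.map_congr_left
  intro k hk
  rw [List.mem_range] at hk
  omega


theorem back_bridge (a b : List Int) (m : Nat) (st : PySem.Set Int × PySem.Set Int × Int) :
    ((List.range m).map (fun k => ((m - 1 - k : Nat) : Int))).foldl
      (fun (st : PySem.Set Int × PySem.Set Int × Int) j =>
        (PySem.Set.add st.1 (PySem.List.pyGetD a (j + 1) 0),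
         PySem.Set.add st.2.1 (PySem.List.pyGetD b (j + 1) 0),
         if PySem.Set.contains st.1 (PySem.List.pyGetD a j 0)
            || PySem.Set.contains st.2.1 (PySem.List.pyGetD a j 0)
            || PySem.Set.contains st.1 (PySem.List.pyGetD b j 0)
            || PySem.Set.contains st.2.1 (PySem.List.pyGetD b j 0)
         then max st.2.2 (j + 1) else st.2.2)) st
    = back a b m st := by
  induction m generalizing st with
  | zero => rfl
  | succ m ih =>
    rw [List.range_succ_eq_map, List.map_cons, List.map_map]
    have h1 : ((fun k => ((m + 1 - 1 - k : Nat) : Int)) ∘ Nat.succ) = fun k => ((m - 1 - k : Nat) : Int) := by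
      funext k
      simp only [Function.comp_apply]
      congr 1
      omega
    rw [h1, List.foldl_cons, ih]
    show back a b m _ = back a b m (backStep a b st m)
    congr 1
    have hc : ((m + 1 - 1 - 0 : Nat) : Int) = (m : Int) := by norm_num
    rw [hc]
    have hc2 : ((m : Int) + 1) = ((m + 1 : Nat) : Int) := by push_cast; ring
    simp only [backStep, hc2, PySem.List.pyGetD_natCast]


theorem back_inv (a b : List Int) (n : Nat) :
    ∀ m, m < n → ∀ (sA sB : PySem.Set Int) (ar : Int), 0 ≤ ar →
    (∀ x : Int, PySem.Set.contains sA x = true ↔ ∃ k, k < n ∧ m + 1 ≤ k ∧ a.getD k 0 = x) →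
    (∀ x : Int, PySem.Set.contains sB x = true ↔ ∃ k, k < n ∧ m + 1 ≤ k ∧ b.getD k 0 = x) →
    (back a b m (sA, sB, ar)).2.2 = max ar (maxF (pA3 a b n) m) := by
  intro m
  induction m with
  | zero =>
    intro _ sA sB ar har _ _
    simp only [back, maxF]
    omega
  | succ m ih =>
    intro hm sA sB ar har hA hB
    have hcheck : (PySem.Set.contains sA (a.getD m 0) || PySem.Set.contains sB (a.getD m 0)
        || PySem.Set.contains sA (b.getD m 0) || PySem.Set.contains sB (b.getD m 0)) = pA3 a b n m := by
      rw [Bool.eq_iff_iff]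
      simp only [Bool.or_eq_true, hA, hB, pA3, List.any_eq_true, List.mem_range,
        Bool.and_eq_true, decide_eq_true_eq, beq_iff_eq]
      constructor
      · rintro (((⟨k, h1, h2, h3⟩ | ⟨k, h1, h2, h3⟩) | ⟨k, h1, h2, h3⟩) | ⟨k, h1, h2, h3⟩) <;>
          exact ⟨k, h1, by omega, by tauto⟩
      · rintro ⟨k, h1, h2, (((h3 | h3) | h3) | h3)⟩
        · exact Or.inl (Or.inl (Or.inl ⟨k, h1, by omega, h3.symm⟩))
        · exact Or.inl (Or.inl (Or.inr ⟨k, h1, by omega, h3.symm⟩))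
        · exact Or.inl (Or.inr ⟨k, h1, by omega, h3.symm⟩)
        · exact Or.inr ⟨k, h1, by omega, h3.symm⟩
    have hA' : ∀ x : Int, PySem.Set.contains (PySem.Set.add sA (a.getD (m + 1) 0)) x = true ↔
        ∃ k, k < n ∧ m + 1 ≤ k ∧ a.getD k 0 = x := by
      intro x
      rw [PySem.Set.contains_iff, PySem.Set.mem_add, ← PySem.Set.contains_iff, hA]
      constructor
      · rintro (⟨k, h1, h2, h3⟩ | h)
        · exact ⟨k, h1, by omega, h3⟩
        · exact ⟨m + 1, by omega, by omega, h.symm⟩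
      · rintro ⟨k, h1, h2, h3⟩
        rcases Nat.eq_or_lt_of_le h2 with he | hl
        · exact Or.inr (by rw [← h3, ← he])
        · exact Or.inl ⟨k, h1, by omega, h3⟩
    have hB' : ∀ x : Int, PySem.Set.contains (PySem.Set.add sB (b.getD (m + 1) 0)) x = true ↔
        ∃ k, k < n ∧ m + 1 ≤ k ∧ b.getD k 0 = x := by
      intro x
      rw [PySem.Set.contains_iff, PySem.Set.mem_add, ← PySem.Set.contains_iff, hB]
      constructor
      · rintro (⟨k, h1, h2, h3⟩ | h)
        · exact ⟨k, h1, by omega, h3⟩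
        · exact ⟨m + 1, by omega, by omega, h.symm⟩
      · rintro ⟨k, h1, h2, h3⟩
        rcases Nat.eq_or_lt_of_le h2 with he | hl
        · exact Or.inr (by rw [← h3, ← he])
        · exact Or.inl ⟨k, h1, by omega, h3⟩
    have hbound := maxF_bounds (pA3 a b n) m
    show (back a b m (backStep a b (sA, sB, ar) m)).2.2 = _
    simp only [backStep, hcheck]
    rcases h3 : pA3 a b n m with _ | _ <;>
      simp only [if_false, if_true, Bool.false_eq_true]
    · rw [ih (by omega) _ _ ar har hA' hB']
      simp only [maxF, h3]
      simp
    · rw [ih (by omega) _ _ (max ar ((m : Int) + 1)) (by omega) hA' hB']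
      simp only [maxF, h3]
      simp only [if_true]
      omega


theorem dict_getD (a b : List Int) (m : Nat) (x : Int) :
    ((List.range m).foldl
      (fun (d : PySem.Dict Int Int) i => (d.insert (a.getD i 0) (i : Int)).insert (b.getD i 0) (i : Int))
      PySem.Dict.empty).getD x 0 = specLast a b m x := by
  induction m with
  | zero => rfl
  | succ m ih =>
    rw [List.range_succ, List.foldl_append, List.foldl_cons, List.foldl_nil]
    rw [PySem.Dict.getD_insert, PySem.Dict.getD_insert]
    simp only [specLast, ih]
    rcases eq_or_ne x (b.getD m 0) with hb | hb
    · simp [hb]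
    · rcases eq_or_ne x (a.getD m 0) with ha | ha
      · rw [if_neg hb, if_pos ha, if_pos]
        simp [ha]
      · rw [if_neg hb, if_neg ha, if_neg]
        simp only [Bool.or_eq_true, beq_iff_eq]
        rintro (h | h)
        · exact ha h.symm
        · exact hb h.symm


theorem specLast_bounds (a b : List Int) (m : Nat) (x : Int) :
    0 ≤ specLast a b m x ∧ specLast a b m x ≤ (m : Int) - 1 ∨ specLast a b m x = 0 := by
  induction m with
  | zero => simp [specLast]
  | succ m ih => simp only [specLast]; split_ifs <;> push_cast <;> omega

theorem specLast_gt (a b : List Int) (m t : Nat) (x : Int) :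
    decide ((t : Int) + 1 < specLast a b m x)
      = (List.range m).any (fun k => decide (t + 2 ≤ k) && (a.getD k 0 == x || b.getD k 0 == x)) := by
  induction m with
  | zero =>
    simp only [specLast, List.range_zero, List.any_nil, decide_eq_false_iff_not, not_lt]
    omega
  | succ m ih =>
    rw [List.range_succ, List.any_append]
    simp only [List.any_cons, List.any_nil, Bool.or_false, ← ih, specLast]
    have hsp := specLast_bounds a b m x
    split_ifs with hmt
    · rw [hmt, Bool.and_true, Bool.eq_iff_iff]
      simp only [decide_eq_true_eq, Bool.or_eq_true]
      omega
    · simp only [Bool.not_eq_true] at hmt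
      rw [hmt]
      simp


theorem pA3_split (a b : List Int) (n j : Nat) :
    pA3 a b n j
      = (((List.range n).any (fun k => decide (j + 2 ≤ k) && (a.getD k 0 == a.getD j 0 || b.getD k 0 == a.getD j 0)))
         || ((List.range n).any (fun k => decide (j + 2 ≤ k) && (a.getD k 0 == b.getD j 0 || b.getD k 0 == b.getD j 0)))) := by
  rw [Bool.eq_iff_iff]
  simp only [pA3, Bool.or_eq_true, List.any_eq_true, List.mem_range, Bool.and_eq_true,
    decide_eq_true_eq, beq_iff_eq]
  constructor
  · rintro ⟨k, h1, h2, (((h3 | h3) | h3) | h3)⟩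
    · exact Or.inl ⟨k, h1, h2, Or.inl h3.symm⟩
    · exact Or.inl ⟨k, h1, h2, Or.inr h3.symm⟩
    · exact Or.inr ⟨k, h1, h2, Or.inl h3.symm⟩
    · exact Or.inr ⟨k, h1, h2, Or.inr h3.symm⟩
  · rintro (⟨k, h1, h2, (h3 | h3)⟩ | ⟨k, h1, h2, (h3 | h3)⟩)
    · exact ⟨k, h1, h2, Or.inl (Or.inl (Or.inl h3.symm))⟩
    · exact ⟨k, h1, h2, Or.inl (Or.inl (Or.inr h3.symm))⟩
    · exact ⟨k, h1, h2, Or.inl (Or.inr h3.symm)⟩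
    · exact ⟨k, h1, h2, Or.inr h3.symm⟩

theorem pyRange_pred (n : Nat) :
    PySem.List.pyRange 0 ((n : Int) - 1) 1 = List.map (fun k : Nat => (k : Int)) (List.range (n - 1)) := by
  cases n with
  | zero => rfl
  | succ m =>
    have h : ((m + 1 : Nat) : Int) - 1 = ((m : Nat) : Int) := by push_cast; ring
    rw [h, PySem.List.pyRange_zero_natCast]
    norm_num

theorem pyRange_backlist (n : Nat) :
    PySem.List.pyRange ((n : Int) - 2) (-1) (-1)
      = (List.range (n - 1)).map (fun k => ((n - 1 - 1 - k : Nat) : Int)) := by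
  match n with
  | 0 => rfl
  | 1 => rfl
  | (m + 2) =>
    have h : ((m + 2 : Nat) : Int) - 2 = ((m : Nat) : Int) := by push_cast; ring
    rw [h, pyRange_negstep]
    apply List.map_congr_left
    intro k _
    congr 1

theorem pA3_last (a b : List Int) (m : Nat) : pA3 a b (m + 1) m = false := by
  simp only [pA3]
  rw [List.any_eq_false]
  intro k hk
  rw [List.mem_range] at hk
  have h2 : decide (m + 2 ≤ k) = false := by simp; omega
  simp [h2]


theorem pyGetD_cast_succ (a : List Int) (k : Nat) (d : Int) :
    PySem.List.pyGetD a ((k : Int) + 1) d = a.getD (k + 1) d := by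
  rw [show ((k : Int) + 1) = ((k + 1 : Nat) : Int) by push_cast; ring, PySem.List.pyGetD_natCast]

theorem empty_char (a : List Int) (m : Nat) :
    ∀ x : Int, PySem.Set.contains PySem.Set.empty x = true ↔
      ∃ k, k < m + 1 ∧ m + 1 ≤ k ∧ a.getD k 0 = x := by
  intro x
  constructor
  · intro h
    simp [PySem.Set.contains, PySem.Set.empty] at h
  · rintro ⟨k, h1, h2, _⟩
    omega

theorem solveA_eq (a b : List Int) :
    solve_pref a b
      = max (max (maxF (pA1 a b) a.length) (maxF (pA2 a b) (a.length - 1)))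
            (maxF (pA3 a b a.length) (a.length - 1)) := by
  have hb1 := maxF_bounds (fun k => a.getD k 0 == b.getD k 0) a.length
  simp only [solve_pref]
  rw [PySem.List.pyRange_zero_natCast, pyRange_pred, pyRange_backlist, back_bridge,
    List.foldl_map, List.foldl_map]
  simp only [pyGetD_cast_succ, PySem.List.pyGetD_natCast]
  rw [foldl_ite_max (fun k => a.getD k 0 == b.getD k 0) a.length 0 le_rfl, max_eq_right hb1.1,
    foldl_ite_max (fun k => (a.getD k 0 == a.getD (k + 1) 0 || b.getD k 0 == b.getD (k + 1) 0))
      (a.length - 1) _ hb1.1]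
  have hrem : (back a b (a.length - 1)
      (PySem.Set.empty, PySem.Set.empty, 0)).2.2 = maxF (pA3 a b a.length) (a.length - 1) := by
    rcases hn : a.length with _ | m
    · simp [back, maxF]
    · have h1 : m + 1 - 1 = m := rfl
      rw [h1]
      rw [back_inv a b (m + 1) m (by omega) _ _ 0 le_rfl (empty_char a m) (empty_char b m)]
      exact max_eq_right (maxF_bounds _ _).1
  rw [hrem]
  rfl


theorem ite_chain (c1 c2 c3 : Bool) (v ans : Int) :
    (if c1 then v else if c2 then v else if c3 then v else ans)
      = if (c1 || c2 || c3) then v else ans := by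
  cases c1 <;> cases c2 <;> cases c3 <;> simp

theorem solveB_eq (a b : List Int) :
    solve_pref_alt a b
      = bestF (fun j => pA1 a b j
           || (decide ((j : Int) + 1 < (a.length : Int)) && pA2 a b j)
           || (decide ((j : Int) + 1 < specLast a b a.length (a.getD j 0))
               || decide ((j : Int) + 1 < specLast a b a.length (b.getD j 0)))) a.length := by
  simp only [solve_pref_alt]
  rw [PySem.List.pyRange_zero_natCast, List.foldl_map, List.foldl_map]
  simp only [pyGetD_cast_succ, PySem.List.pyGetD_natCast]
  simp only [dict_getD]
  simp only [ite_chain]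
  rw [foldl_ite_best (fun k => (a.getD k 0 == b.getD k 0)
        || (decide ((k : Int) + 1 < (a.length : Int))
            && (a.getD k 0 == a.getD (k + 1) 0 || b.getD k 0 == b.getD (k + 1) 0))
        || (decide ((k : Int) + 1 < specLast a b a.length (a.getD k 0))
            || decide ((k : Int) + 1 < specLast a b a.length (b.getD k 0)))) a.length]
  rfl


theorem bestF_guard (p : Nat → Bool) (n : Nat) :
    bestF (fun j => decide (j + 1 < n) && p j) n = bestF p (n - 1) := by
  cases n with
  | zero => rfl
  | succ m =>
    show bestF _ (m + 1) = bestF p m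
    simp only [bestF]
    simp only [show decide (m + 1 < m + 1) = false by simp, Bool.false_and,
      Bool.false_eq_true, if_false]
    refine bestF_congr _ _ m (fun j hj => ?_)
    have hg : decide (j + 1 < m + 1) = true := by simp; omega
    rw [hg, Bool.true_and]

theorem bestF_drop_last_pA3 (a b : List Int) (n : Nat) :
    bestF (pA3 a b n) n = bestF (pA3 a b n) (n - 1) := by
  cases n with
  | zero => rfl
  | succ m =>
    show bestF _ (m + 1) = bestF _ m
    simp only [bestF, pA3_last, Bool.false_eq_true, if_false]

-- ===== VERDICT (by name: the statement is the Claim_ definition above) =====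
theorem solve_pref_spec : Claim_equal_solve_pref := by
  unfold Claim_equal_solve_pref
  intro a b _ _
  unfold Spec_solve_pref
  rw [solveA_eq, solveB_eq]
  have R1 : bestF (fun j => pA1 a b j
        || (decide ((j : Int) + 1 < (a.length : Int)) && pA2 a b j)
        || (decide ((j : Int) + 1 < specLast a b a.length (a.getD j 0))
            || decide ((j : Int) + 1 < specLast a b a.length (b.getD j 0)))) a.length
      = bestF (fun j => pA1 a b j || (decide (j + 1 < a.length) && pA2 a b j)
              || pA3 a b a.length j) a.length := by
    refine bestF_congr _ _ a.length (fun j hj => ?_)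
    rw [specLast_gt a b a.length j (a.getD j 0), specLast_gt a b a.length j (b.getD j 0),
      ← pA3_split]
    have hd : decide ((j : Int) + 1 < (a.length : Int)) = decide (j + 1 < a.length) := by
      rw [decide_eq_decide]; omega
    rw [hd]
  rw [R1]
  rw [bestF_or (fun j => pA1 a b j || (decide (j + 1 < a.length) && pA2 a b j))
      (fun j => pA3 a b a.length j) a.length]
  rw [bestF_or (fun j => pA1 a b j) (fun j => decide (j + 1 < a.length) && pA2 a b j) a.length]
  rw [bestF_guard (pA2 a b) a.length]
  rw [show (fun j => pA3 a b a.length j) = pA3 a b a.length from rfl, bestF_drop_last_pA3]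
  rw [maxF_eq_bestF, maxF_eq_bestF, maxF_eq_bestF]
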